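-- pv_equiv track=rewrite | github.com/ddoyoon/BayesianOptimization | examples/tutorial.py | get_discrete_idx
-- ===== SOURCE A (Python) =====
-- def get_discrete_idx(pbounds, discrete_names):
--     param_names = list(pbounds.keys())
--     param_names.sort()
--
--     discrete_list = [0] * len(param_names)
--     for i in range(len(param_names)):
--         if param_names[i] in discrete_names:
--             discrete_list[i] = 1
--
--     return discrete_list
-- ===== SOURCE B (Python) =====
-- def get_discrete_idx(pbounds, discrete_names):
--     names = sorted(pbounds)
--     pos = {name: i for i, name in enumerate(names)}
--     discrete_list = [0] * len(names)
--     for name in discrete_names: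
--         i = pos.get(name)
--         if i is not None:
--             discrete_list[i] = 1
--     return discrete_list
-- ===== Notes on version B (the rewrite author's own statement) =====
-- stated objective: faster
-- what changed: Instead of scanning every sorted param and testing membership in discrete_names (a linear scan per param), B builds a name-to-index dict once and iterates over discrete_names, writing 1 at each looked-up position (loop inverted, inner membership scan removed).
import Mathlib
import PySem

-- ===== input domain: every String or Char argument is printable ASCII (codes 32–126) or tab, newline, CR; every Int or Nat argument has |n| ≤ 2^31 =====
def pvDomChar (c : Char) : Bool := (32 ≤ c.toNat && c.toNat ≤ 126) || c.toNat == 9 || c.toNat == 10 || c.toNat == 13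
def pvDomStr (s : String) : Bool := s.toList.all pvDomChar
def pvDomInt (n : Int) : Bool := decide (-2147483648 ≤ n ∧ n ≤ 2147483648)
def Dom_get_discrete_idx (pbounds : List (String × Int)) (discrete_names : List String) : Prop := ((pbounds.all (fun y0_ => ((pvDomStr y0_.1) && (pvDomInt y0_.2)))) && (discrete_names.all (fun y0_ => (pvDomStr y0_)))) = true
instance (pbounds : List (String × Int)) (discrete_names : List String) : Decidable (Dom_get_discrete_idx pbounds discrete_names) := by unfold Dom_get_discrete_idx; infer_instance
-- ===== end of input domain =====

-- B inverts the driving loop: instead of testing each sorted param name against discrete_names,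
-- it builds a name→index dict once and walks discrete_names, writing 1 at each looked-up position.

-- ===== PORT A =====
def get_discrete_idx (pbounds : List (String × Int)) (discrete_names : List String) : List Int :=
  let param_names := PySem.List.sorted ((PySem.Dict.ofList pbounds).keys) (fun x => x) false
  -- for i in range(len(param_names)): if param_names[i] in discrete_names: discrete_list[i] = 1
  (PySem.List.pyRange 0 (param_names.length : Int) 1).foldl
    (fun acc i =>
      if PySem.List.pyGetD param_names i "" ∈ discrete_names then
        PySem.List.pySetD acc i 1
      else acc)
    (List.replicate param_names.length (0 : Int))

-- ===== PORT B =====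
def get_discrete_idx_alt (pbounds : List (String × Int)) (discrete_names : List String) : List Int :=
  let names := PySem.List.sorted ((PySem.Dict.ofList pbounds).keys) (fun x => x) false
  -- pos = {name: i for i, name in enumerate(names)}
  let pos : PySem.Dict String Int :=
    (PySem.List.enumerate names).foldl (fun d p => d.insert p.2 p.1) PySem.Dict.empty
  -- for name in discrete_names: i = pos.get(name); if i is not None: discrete_list[i] = 1
  discrete_names.foldl
    (fun acc name =>
      match pos.get? name with
      | some i => PySem.List.pySetD acc i 1
      | none => acc)
    (List.replicate names.length (0 : Int))

-- ===== PRECONDITION & SPEC =====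
def Spec_get_discrete_idx (pbounds : List (String × Int)) (discrete_names : List String) (out : List Int) : Prop := out = get_discrete_idx_alt pbounds discrete_names
instance (pbounds : List (String × Int)) (discrete_names : List String) (out : List Int) : Decidable (Spec_get_discrete_idx pbounds discrete_names out) := by unfold Spec_get_discrete_idx; infer_instance

-- ===== CLAIM (what is proved, stated in full; the proofs are below) =====
def Claim_equal_get_discrete_idx : Prop := ∀ (pbounds : List (String × Int)) (discrete_names : List String), Dom_get_discrete_idx pbounds discrete_names → Spec_get_discrete_idx pbounds discrete_names (get_discrete_idx pbounds discrete_names)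

-- ===== LEMMAS AND PROOFS =====

-- A's loop, pointwise: folding index writes over a list of in-range indices.
theorem pvA_fold (names : List String) (dns : List String) :
    ∀ (is_ : List Int) (acc : List Int), (∀ i ∈ is_, 0 ≤ i ∧ i < acc.length) →
      (is_.foldl (fun acc i =>
          if PySem.List.pyGetD names i "" ∈ dns then PySem.List.pySetD acc i 1 else acc) acc).length
        = acc.length ∧
      ∀ (j : Nat), j < acc.length →
        (is_.foldl (fun acc i =>
          if PySem.List.pyGetD names i "" ∈ dns then PySem.List.pySetD acc i 1 else acc) acc).getD j 0 =
        if ((j : Int) ∈ is_ ∧ PySem.List.pyGetD names (j : Int) "" ∈ dns) then 1 else acc.getD j 0 := by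
  intro is_
  induction is_ with
  | nil => intro acc _; simp
  | cons i rest ih =>
    intro acc h
    simp only [List.foldl_cons]
    have hi := h i (List.mem_cons_self)
    have hlen' : (if PySem.List.pyGetD names i "" ∈ dns then PySem.List.pySetD acc i 1 else acc).length = acc.length := by
      split <;> simp [PySem.List.length_pySetD]
    have hrest : ∀ i' ∈ rest, 0 ≤ i' ∧ i' < (if PySem.List.pyGetD names i "" ∈ dns then PySem.List.pySetD acc i 1 else acc).length := by
      intro i' hi'; rw [hlen']; exact h i' (List.mem_cons_of_mem _ hi')
    obtain ⟨hl, hg⟩ := ih _ hrest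
    refine ⟨by rw [hl, hlen'], ?_⟩
    intro j hj
    rw [hg j (by omega)]
    by_cases hjr : ((j : Int) ∈ rest ∧ PySem.List.pyGetD names (j : Int) "" ∈ dns)
    · rw [if_pos hjr, if_pos ⟨List.mem_cons_of_mem _ hjr.1, hjr.2⟩]
    · rw [if_neg hjr]
      by_cases hji : (j : Int) = i
      · obtain rfl : i = (j : Int) := hji.symm
        by_cases hP : PySem.List.pyGetD names (j : Int) "" ∈ dns
        · rw [if_pos hP, PySem.List.pySetD_natCast,
              List.getD_eq_getElem _ _ (by simpa using hj), List.getElem_set_self,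
              if_pos (show (j : Int) ∈ (j : Int) :: rest ∧ PySem.List.pyGetD names (j : Int) "" ∈ dns from ⟨List.mem_cons_self, hP⟩)]
        · rw [if_neg hP, if_neg (fun hc : _ ∧ _ => hP hc.2)]
      · have hne : ¬((j : Int) ∈ i :: rest ∧ PySem.List.pyGetD names (j : Int) "" ∈ dns) := by
          rintro ⟨hm, hP⟩
          rcases List.mem_cons.mp hm with h1 | h2
          · exact hji h1
          · exact hjr ⟨h2, hP⟩
        rw [if_neg hne]
        split
        · rw [PySem.List.pySetD_of_nonneg _ _ hi.1]
          rw [List.getD_eq_getElem _ _ (by simpa using hj),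
              List.getD_eq_getElem _ _ hj, List.getElem_set_ne (by omega)]
        · rfl

-- the position dict: lookup = first index, given nodup names
theorem pvPos_get? (names : List String) (nm : String) :
    ∀ (s : Int) (d : PySem.Dict String Int), names.Nodup →
      ((PySem.List.enumerate names s).foldl (fun d p => d.insert p.2 p.1) d).get? nm
        = match PySem.List.index? names nm with
          | some k => some (s + (k : Int))
          | none => d.get? nm := by
  induction names with
  | nil => intro s d _; simp [PySem.List.enumerate_nil]
  | cons x xs ih =>
    intro s d hnd
    rw [PySem.List.enumerate_cons]
    simp only [List.foldl_cons]
    rw [ih (s+1) (d.insert x s) hnd.of_cons]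
    by_cases hx : nm = x
    · subst hx
      have hnot : nm ∉ xs := (List.nodup_cons.mp hnd).1
      rw [PySem.List.index?_cons_self]
      rw [(PySem.List.index?_eq_none_iff xs nm).mpr hnot]
      simp [PySem.Dict.get?_insert_self]
    · rw [PySem.List.index?_cons_of_ne xs (fun h => hx h.symm)]
      cases hk : PySem.List.index? xs nm with
      | none => simp [PySem.Dict.get?_insert_of_ne _ _ hx]
      | some k =>
        simp only [Option.map_some]
        have : s + 1 + (k : Int) = s + ((k : Nat) + 1 : Nat) := by push_cast; ring
        simp [this]

-- in a duplicate-free list, the first index of names[j] is j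
theorem pvIndex?_self (names : List String) (hnd : names.Nodup) (j : Nat) (hj : j < names.length) :
    PySem.List.index? names (names[j]'hj) = some j := by
  rw [PySem.List.index?_eq_some_iff]
  refine ⟨names.take j, names.drop (j+1), ?_, by simp [List.length_take]; omega, ?_⟩
  · rw [List.getElem_cons_drop, List.take_append_drop]
  · intro hmem
    obtain ⟨k, hk, hke⟩ := List.getElem_of_mem hmem
    have hkj : k < j := by simp [List.length_take] at hk; omega
    rw [List.getElem_take] at hke
    exact absurd (List.Nodup.getElem_inj_iff hnd |>.mp hke) (by omega)

-- B's loop, pointwise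
theorem pvB_fold (names : List String) (hnd : names.Nodup) :
    ∀ (dns : List String) (acc : List Int), acc.length = names.length →
      (dns.foldl (fun acc name =>
          match (match PySem.List.index? names name with
                 | some k => some ((k : Int))
                 | none => none) with
          | some i => PySem.List.pySetD acc i 1
          | none => acc) acc).length = acc.length ∧
      ∀ (j : Nat), j < acc.length →
        (dns.foldl (fun acc name =>
          match (match PySem.List.index? names name with
                 | some k => some ((k : Int))
                 | none => none) with
          | some i => PySem.List.pySetD acc i 1
          | none => acc) acc).getD j 0 =
        if names.getD j "" ∈ dns then 1 else acc.getD j 0 := by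
  intro dns
  induction dns with
  | nil => intro acc _; simp
  | cons nm rest ih =>
    intro acc hlen
    simp only [List.foldl_cons]
    have hlen' : (match (match PySem.List.index? names nm with
                 | some k => some ((k : Int))
                 | none => none) with
          | some i => PySem.List.pySetD acc i 1
          | none => acc).length = acc.length := by
      cases PySem.List.index? names nm <;> simp
    obtain ⟨hl, hg⟩ := ih _ (hlen'.trans hlen)
    refine ⟨hl.trans hlen', ?_⟩
    intro j hj
    rw [hg j (by omega)]
    by_cases hr : names.getD j "" ∈ rest
    · rw [if_pos hr, if_pos (List.mem_cons_of_mem _ hr)]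
    · rw [if_neg hr]
      have hjn : j < names.length := hlen ▸ hj
      have hgd : names.getD j "" = names[j]'hjn := List.getD_eq_getElem _ _ hjn
      by_cases heq : names.getD j "" = nm
      · have hidx : PySem.List.index? names nm = some j := by
          rw [← heq, hgd]; exact pvIndex?_self names hnd j hjn
        rw [hidx]
        simp only [PySem.List.pySetD_natCast]
        rw [List.getD_eq_getElem _ _ (by simpa using hj), List.getElem_set_self,
            if_pos (heq ▸ List.mem_cons_self)]
      · have hne : names.getD j "" ∉ nm :: rest := by
          intro hc; rcases List.mem_cons.mp hc with h1 | h2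
          · exact heq h1
          · exact hr h2
        rw [if_neg hne]
        cases hk : PySem.List.index? names nm with
        | none => rfl
        | some k =>
          obtain ⟨hkl, hke, -⟩ := PySem.List.getElem_of_index?_eq_some hk
          have hkj : k ≠ j := by
            intro hjk; subst hjk
            exact heq (hgd.trans hke)
          simp only [PySem.List.pySetD_natCast]
          rw [List.getD_eq_getElem _ _ (by simpa using hj),
              List.getD_eq_getElem _ _ hj, List.getElem_set_ne (by omega)]

-- ===== VERDICT (by name: the statement is the Claim_ definition above) =====
theorem get_discrete_idx_spec : Claim_equal_get_discrete_idx := by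
  intro pbounds discrete_names _
  unfold Spec_get_discrete_idx get_discrete_idx get_discrete_idx_alt
  set names := PySem.List.sorted ((PySem.Dict.ofList pbounds).keys) (fun x => x) false with hnames
  have hnd : names.Nodup :=
    ((PySem.List.sorted_perm _ _ _).nodup_iff).mpr (PySem.Dict.nodup_keys_ofList pbounds)
  have hpos : ∀ nm : String,
      ((PySem.List.enumerate names).foldl (fun d p => d.insert p.2 p.1)
        (PySem.Dict.empty : PySem.Dict String Int)).get? nm
      = match PySem.List.index? names nm with
        | some k => some ((k : Int))
        | none => none := by
    intro nm
    rw [pvPos_get? names nm 0 PySem.Dict.empty hnd]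
    cases PySem.List.index? names nm <;> simp [PySem.Dict.get?_empty]
  simp only [hpos]
  obtain ⟨hAl, hAg⟩ := pvA_fold names discrete_names
    (PySem.List.pyRange 0 (names.length : Int) 1) (List.replicate names.length 0)
    (by intro i hi
        have := (PySem.List.mem_pyRange_one).mp hi
        simpa using this)
  obtain ⟨hBl, hBg⟩ := pvB_fold names hnd discrete_names (List.replicate names.length 0)
    (by simp)
  apply List.ext_getElem
  · rw [hAl, hBl]
  · intro j hjA hjB
    have hj : j < names.length := by rw [hAl] at hjA; simpa using hjA
    rw [← List.getD_eq_getElem _ 0 hjA, ← List.getD_eq_getElem _ 0 hjB,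
        hAg j (by simpa using hj), hBg j (by simpa using hj)]
    have hmem : (j : Int) ∈ PySem.List.pyRange 0 (names.length : Int) 1 :=
      (PySem.List.mem_pyRange_one).mpr (by constructor <;> [positivity; exact_mod_cast hj])
    have hget : PySem.List.pyGetD names (j : Int) "" = names.getD j "" :=
      PySem.List.pyGetD_natCast names j ""
    by_cases hd : names.getD j "" ∈ discrete_names
    · rw [if_pos ⟨hmem, hget ▸ hd⟩, if_pos hd]
    · rw [if_neg (fun hc => hd (hget ▸ hc.2)), if_neg hd]
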